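-- pv_equiv track=rewrite | github.com/ericwang915/ValueClaw | value_claw/templates/skills/invest/sector-rotation/sector_rotation.py | infer_cycle
-- ===== SOURCE A (Python) =====
-- CYCLE_MAP = {
--     "Early": ["XLF", "XLY", "XLRE", "XLI"],
--     "Mid": ["XLK", "XLI", "XLB", "XLC"],
--     "Late": ["XLE", "XLB", "XLP"],
--     "Recession": ["XLU", "XLV", "XLP"],
-- }
--
-- def infer_cycle(results: list[dict]) -> str:
--     """Infer business cycle phase from leading sectors."""
--     top3_etfs = {r["etf"] for r in results[:3]}
--     scores = {}
--     for phase, etfs in CYCLE_MAP.items():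
--         overlap = len(top3_etfs & set(etfs))
--         scores[phase] = overlap
--     best = max(scores, key=scores.get)
--     return best
-- ===== SOURCE B (Python) =====
-- CYCLE_MAP = {
--     "Early": ["XLF", "XLY", "XLRE", "XLI"],
--     "Mid": ["XLK", "XLI", "XLB", "XLC"],
--     "Late": ["XLE", "XLB", "XLP"],
--     "Recession": ["XLU", "XLV", "XLP"],
-- }
--
-- # Precomputed inverted index: ETF -> phases whose CYCLE_MAP list contains it.
-- ETF_TO_PHASES = {
--     "XLF": ["Early"],
--     "XLY": ["Early"],
--     "XLRE": ["Early"],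
--     "XLI": ["Early", "Mid"],
--     "XLK": ["Mid"],
--     "XLB": ["Mid", "Late"],
--     "XLC": ["Mid"],
--     "XLE": ["Late"],
--     "XLP": ["Late", "Recession"],
--     "XLU": ["Recession"],
--     "XLV": ["Recession"],
-- }
--
-- def infer_cycle(results: list[dict]) -> str:
--     """Infer business cycle phase from leading sectors."""
--     scores = {phase: 0 for phase in CYCLE_MAP}
--     for etf in {r["etf"] for r in results[:3]}:
--         for phase in ETF_TO_PHASES.get(etf, []):
--             scores[phase] += 1
--     return max(scores, key=scores.get)
-- ===== Notes on version B (the rewrite author's own statement) =====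
-- stated objective: alternative
-- what changed: Replaces the per-phase set-intersection pass (building set(etfs) and intersecting with top3 for each phase) by a precomputed inverted index ETF_TO_PHASES: scores start at 0 for every phase in CYCLE_MAP order and each distinct top-3 ETF increments exactly the phases it belongs to.
import Mathlib
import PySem

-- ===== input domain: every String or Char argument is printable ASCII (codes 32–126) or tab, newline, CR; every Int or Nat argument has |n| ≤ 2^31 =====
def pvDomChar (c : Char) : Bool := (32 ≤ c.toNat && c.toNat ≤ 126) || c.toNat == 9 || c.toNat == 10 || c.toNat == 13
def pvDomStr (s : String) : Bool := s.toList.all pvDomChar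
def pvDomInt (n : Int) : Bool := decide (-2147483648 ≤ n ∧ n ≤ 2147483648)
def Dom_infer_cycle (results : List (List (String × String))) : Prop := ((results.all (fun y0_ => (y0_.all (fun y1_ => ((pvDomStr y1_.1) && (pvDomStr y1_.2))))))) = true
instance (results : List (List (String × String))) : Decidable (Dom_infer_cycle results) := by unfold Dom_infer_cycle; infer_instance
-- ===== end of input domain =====

-- B replaces A's per-phase set intersections by a precomputed inverted index (ETF -> phases)
-- and a single increment loop over the distinct top-3 ETFs; same result, different decomposition.

-- ===== PORT A =====
def pvCYCLE_MAP : PySem.Dict String (List String) :=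
  PySem.Dict.ofList [("Early", ["XLF", "XLY", "XLRE", "XLI"]),
                     ("Mid", ["XLK", "XLI", "XLB", "XLC"]),
                     ("Late", ["XLE", "XLB", "XLP"]),
                     ("Recession", ["XLU", "XLV", "XLP"])]

def infer_cycle (results : List (List (String × String))) : String :=
  -- top3_etfs = {r["etf"] for r in results[:3]}   (Pre_ excludes the KeyError case, so getD "" is never used)
  let top3_etfs : PySem.Set String :=
    PySem.Set.ofList ((PySem.List.slice results none (some 3)).map
      (fun r => ((PySem.Dict.mk r).get? "etf").getD ""))
  -- for phase, etfs in CYCLE_MAP.items(): scores[phase] = len(top3_etfs & set(etfs))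
  let scores : PySem.Dict String Int :=
    pvCYCLE_MAP.items.foldl (fun sc pe =>
      sc.insert pe.1 ((PySem.Set.inter top3_etfs (PySem.Set.ofList pe.2)).length : Int)) PySem.Dict.empty
  -- best = max(scores, key=scores.get)
  ((PySem.List.max? scores.keys (fun k => scores.getD k 0)).getD "")

-- ===== PORT B =====
def pvETF_TO_PHASES : PySem.Dict String (List String) :=
  PySem.Dict.ofList [("XLF", ["Early"]), ("XLY", ["Early"]), ("XLRE", ["Early"]),
                     ("XLI", ["Early", "Mid"]), ("XLK", ["Mid"]), ("XLB", ["Mid", "Late"]),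
                     ("XLC", ["Mid"]), ("XLE", ["Late"]), ("XLP", ["Late", "Recession"]),
                     ("XLU", ["Recession"]), ("XLV", ["Recession"])]

def infer_cycle_alt (results : List (List (String × String))) : String :=
  -- scores = {phase: 0 for phase in CYCLE_MAP}
  let scores0 : PySem.Dict String Int :=
    pvCYCLE_MAP.keys.foldl (fun d phase => d.insert phase 0) PySem.Dict.empty
  -- for etf in {r["etf"] for r in results[:3]}: for phase in ETF_TO_PHASES.get(etf, []): scores[phase] += 1
  let scores : PySem.Dict String Int :=
    (PySem.Set.ofList ((PySem.List.slice results none (some 3)).map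
      (fun r => ((PySem.Dict.mk r).get? "etf").getD ""))).foldl
      (fun sc etf => (pvETF_TO_PHASES.getD etf []).foldl
        (fun sc phase => sc.modify phase 0 (· + 1)) sc) scores0
  -- return max(scores, key=scores.get)
  ((PySem.List.max? scores.keys (fun k => scores.getD k 0)).getD "")

-- ===== PRECONDITION & SPEC =====
-- Pre_ excludes exactly the inputs on which Python A raises KeyError: a dict among the
-- first three results without the key "etf".
def Pre_infer_cycle (results : List (List (String × String))) : Prop :=
  ∀ r ∈ results.take 3, ((PySem.Dict.mk r).get? "etf").isSome = true
instance (results : List (List (String × String))) : Decidable (Pre_infer_cycle results) := by unfold Pre_infer_cycle; infer_instance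

def pvWitness_infer_cycle : (List (List (String × String))) :=
  [[("etf", "XLK")], [("etf", "XLB")], [("etf", "XLP")], [("etf", "SPY")]]

def Spec_infer_cycle (results : List (List (String × String))) (out : String) : Prop := out = infer_cycle_alt results
instance (results : List (List (String × String))) (out : String) : Decidable (Spec_infer_cycle results out) := by unfold Spec_infer_cycle; infer_instance

-- ===== CLAIM (what is proved, stated in full; the proofs are below) =====
def Claim_equal_infer_cycle : Prop := ∀ (results : List (List (String × String))), Dom_infer_cycle results → Pre_infer_cycle results → Spec_infer_cycle results (infer_cycle results)

-- ===== LEMMAS AND PROOFS =====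

-- One step of B's increment loop, on the four-entry score dict.
lemma pv_step (a b c d : Int) (etf : String) :
    (pvETF_TO_PHASES.getD etf []).foldl (fun sc phase => sc.modify phase 0 (· + 1))
      (PySem.Dict.mk [("Early", a), ("Mid", b), ("Late", c), ("Recession", d)])
    = PySem.Dict.mk
        [("Early", if etf ∈ (["XLF", "XLY", "XLRE", "XLI"] : List String) then a + 1 else a),
         ("Mid", if etf ∈ (["XLK", "XLI", "XLB", "XLC"] : List String) then b + 1 else b),
         ("Late", if etf ∈ (["XLE", "XLB", "XLP"] : List String) then c + 1 else c),
         ("Recession", if etf ∈ (["XLU", "XLV", "XLP"] : List String) then d + 1 else d)] := by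
  have hidx : pvETF_TO_PHASES = PySem.Dict.mk
      [("XLF", ["Early"]), ("XLY", ["Early"]), ("XLRE", ["Early"]),
       ("XLI", ["Early", "Mid"]), ("XLK", ["Mid"]), ("XLB", ["Mid", "Late"]),
       ("XLC", ["Mid"]), ("XLE", ["Late"]), ("XLP", ["Late", "Recession"]),
       ("XLU", ["Recession"]), ("XLV", ["Recession"])] := by decide
  rw [hidx]
  by_cases h1 : "XLF" = etf
  · subst h1; simp [PySem.Dict.getD, PySem.Dict.modify, PySem.Dict.insert, PySem.Dict.get?, PySem.Dict.contains]
  by_cases h2 : "XLY" = etf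
  · subst h2; simp [PySem.Dict.getD, PySem.Dict.modify, PySem.Dict.insert, PySem.Dict.get?, PySem.Dict.contains]
  by_cases h3 : "XLRE" = etf
  · subst h3; simp [PySem.Dict.getD, PySem.Dict.modify, PySem.Dict.insert, PySem.Dict.get?, PySem.Dict.contains]
  by_cases h4 : "XLI" = etf
  · subst h4; simp [PySem.Dict.getD, PySem.Dict.modify, PySem.Dict.insert, PySem.Dict.get?, PySem.Dict.contains]
  by_cases h5 : "XLK" = etf
  · subst h5; simp [PySem.Dict.getD, PySem.Dict.modify, PySem.Dict.insert, PySem.Dict.get?, PySem.Dict.contains]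
  by_cases h6 : "XLB" = etf
  · subst h6; simp [PySem.Dict.getD, PySem.Dict.modify, PySem.Dict.insert, PySem.Dict.get?, PySem.Dict.contains]
  by_cases h7 : "XLC" = etf
  · subst h7; simp [PySem.Dict.getD, PySem.Dict.modify, PySem.Dict.insert, PySem.Dict.get?, PySem.Dict.contains]
  by_cases h8 : "XLE" = etf
  · subst h8; simp [PySem.Dict.getD, PySem.Dict.modify, PySem.Dict.insert, PySem.Dict.get?, PySem.Dict.contains]
  by_cases h9 : "XLP" = etf
  · subst h9; simp [PySem.Dict.getD, PySem.Dict.modify, PySem.Dict.insert, PySem.Dict.get?, PySem.Dict.contains]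
  by_cases h10 : "XLU" = etf
  · subst h10; simp [PySem.Dict.getD, PySem.Dict.modify, PySem.Dict.insert, PySem.Dict.get?, PySem.Dict.contains]
  by_cases h11 : "XLV" = etf
  · subst h11; simp [PySem.Dict.getD, PySem.Dict.modify, PySem.Dict.insert, PySem.Dict.get?, PySem.Dict.contains]
  simp [PySem.Dict.getD, PySem.Dict.modify, PySem.Dict.insert, PySem.Dict.get?, PySem.Dict.contains, h1, h2, h3, h4, h5, h6, h7, h8, h9, h10, h11, Ne.symm h1, Ne.symm h2, Ne.symm h3, Ne.symm h4, Ne.symm h5, Ne.symm h6, Ne.symm h7, Ne.symm h8, Ne.symm h9, Ne.symm h10, Ne.symm h11]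

-- B's whole loop, as four membership counts.
lemma pv_loop (s : List String) : ∀ (a b c d : Int),
    s.foldl (fun sc etf => (pvETF_TO_PHASES.getD etf []).foldl (fun sc phase => sc.modify phase 0 (· + 1)) sc)
      (PySem.Dict.mk [("Early", a), ("Mid", b), ("Late", c), ("Recession", d)])
    = PySem.Dict.mk
        [("Early", a + (s.countP (fun x => decide (x ∈ (["XLF", "XLY", "XLRE", "XLI"] : List String))) : Int)),
         ("Mid", b + (s.countP (fun x => decide (x ∈ (["XLK", "XLI", "XLB", "XLC"] : List String))) : Int)),
         ("Late", c + (s.countP (fun x => decide (x ∈ (["XLE", "XLB", "XLP"] : List String))) : Int)),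
         ("Recession", d + (s.countP (fun x => decide (x ∈ (["XLU", "XLV", "XLP"] : List String))) : Int))] := by
  induction s with
  | nil => intro a b c d; simp
  | cons x t ih =>
    intro a b c d
    simp only [List.foldl_cons, pv_step, ih, List.countP_cons]
    simp only [decide_eq_true_eq]
    split_ifs <;>
      (simp only [PySem.Dict.mk.injEq, List.cons.injEq, Prod.mk.injEq, and_true, true_and]; push_cast; omega)

-- A's scores dict equals B's scores dict, for any list of top-3 ETFs.
lemma pv_scores_eq (s : List String) :
    pvCYCLE_MAP.items.foldl (fun sc pe =>
      sc.insert pe.1 ((PySem.Set.inter s (PySem.Set.ofList pe.2)).length : Int)) PySem.Dict.empty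
    = s.foldl (fun sc etf => (pvETF_TO_PHASES.getD etf []).foldl
        (fun sc phase => sc.modify phase 0 (· + 1)) sc)
        (pvCYCLE_MAP.keys.foldl (fun d phase => d.insert phase 0) PySem.Dict.empty) := by
  have h0 : (pvCYCLE_MAP.keys.foldl (fun d phase => d.insert phase 0) PySem.Dict.empty : PySem.Dict String Int)
      = PySem.Dict.mk [("Early", 0), ("Mid", 0), ("Late", 0), ("Recession", 0)] := by decide
  have hmap : pvCYCLE_MAP = PySem.Dict.mk
      [("Early", ["XLF", "XLY", "XLRE", "XLI"]), ("Mid", ["XLK", "XLI", "XLB", "XLC"]),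
       ("Late", ["XLE", "XLB", "XLP"]), ("Recession", ["XLU", "XLV", "XLP"])] := by decide
  rw [h0, pv_loop]
  simp [hmap, PySem.Dict.insert, PySem.Dict.contains, PySem.Dict.empty, PySem.Set.inter,
        PySem.Set.contains, PySem.Set.ofList, PySem.Set.add, List.countP_eq_length_filter]

-- ===== VERDICT (by name: the statement is the Claim_ definition above) =====
theorem infer_cycle_spec : Claim_equal_infer_cycle := by
  intro results _hd _hp
  show infer_cycle results = infer_cycle_alt results
  simp only [infer_cycle, infer_cycle_alt]
  rw [pv_scores_eq]
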